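-- pv_equiv track=rewrite | github.com/aquesnel/rdps2rdp | serializers.py | get_serialized_length
-- ===== SOURCE A (Python) =====
-- def get_serialized_length(value: int) -> int:
--     if value < 0x80:
--         return 1
--     else:
--         length = 1
--         while value > 0:
--             value >>= 8
--             length += 1
--         return length
-- ===== SOURCE B (Python) =====
-- def get_serialized_length(value: int) -> int:
--     if value < 0x80:
--         return 1
--     return (value.bit_length() + 7) // 8 + 1
-- ===== Notes on version B (the rewrite author's own statement) =====
-- stated objective: idiomatic
-- what changed: Replaced the shift-and-count while loop with a closed-form ceiling-division expression over value.bit_length().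
import Mathlib
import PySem

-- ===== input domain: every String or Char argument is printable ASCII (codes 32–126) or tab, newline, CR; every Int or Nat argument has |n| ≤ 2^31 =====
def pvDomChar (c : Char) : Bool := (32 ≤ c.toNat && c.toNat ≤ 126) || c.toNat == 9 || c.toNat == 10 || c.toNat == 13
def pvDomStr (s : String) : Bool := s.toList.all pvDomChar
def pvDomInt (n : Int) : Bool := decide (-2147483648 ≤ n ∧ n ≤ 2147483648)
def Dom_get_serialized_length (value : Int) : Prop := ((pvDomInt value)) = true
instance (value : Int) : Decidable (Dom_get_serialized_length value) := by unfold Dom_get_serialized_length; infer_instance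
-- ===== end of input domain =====

-- B replaces A's shift-and-count loop with a closed-form ceiling division of the bit length (idiomatic).

-- ===== PORT A =====
-- the while loop of A: value >>= 8; length += 1 while value > 0 (value ≥ 0x80 on entry, so it is a Nat)
def pvLenLoop (n : Nat) (len : Int) : Int :=
  if _h : 0 < n then pvLenLoop (n / 256) (len + 1) else len
decreasing_by exact Nat.div_lt_self _h (by norm_num)

def get_serialized_length (value : Int) : Int :=
  if value < 0x80 then 1 else pvLenLoop value.toNat 1

-- ===== PORT B =====
def get_serialized_length_alt (value : Int) : Int :=
  if value < 0x80 then 1 else ((PySem.Int.bitLength value + 7) / 8 + 1 : Nat)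

-- ===== PRECONDITION & SPEC =====
def Spec_get_serialized_length (value : Int) (out : Int) : Prop := out = get_serialized_length_alt value
instance (value : Int) (out : Int) : Decidable (Spec_get_serialized_length value out) := by unfold Spec_get_serialized_length; infer_instance

-- ===== CLAIM (what is proved, stated in full; the proofs are below) =====
def Claim_equal_get_serialized_length : Prop := ∀ (value : Int), Dom_get_serialized_length value → Spec_get_serialized_length value (get_serialized_length value)

-- ===== LEMMAS AND PROOFS =====

-- bitLength is pinned down by the two-power bracket
lemma bitLength_eq_of_bracket (m : Nat) (k : Nat) (hk : 1 ≤ k)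
    (h1 : 2 ^ (k - 1) ≤ m) (h2 : m < 2 ^ k) : PySem.Int.bitLength (m : Int) = k := by
  have hm : (m : Int) ≠ 0 := by
    have : 0 < m := lt_of_lt_of_le (Nat.two_pow_pos (k-1)) h1
    exact_mod_cast this.ne'
  have hlo := PySem.Int.two_pow_bitLength_le (m : Int) hm
  have hhi := PySem.Int.lt_two_pow_bitLength (m : Int)
  have habs : (m : Int).natAbs = m := Int.natAbs_natCast m
  rw [habs] at hlo hhi
  set b := PySem.Int.bitLength (m : Int) with hb
  by_contra hne
  rcases Nat.lt_or_ge b k with h | h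
  · have : (2:Nat) ^ b ≤ 2 ^ (k - 1) := Nat.pow_le_pow_right (by norm_num) (by omega)
    omega
  · have hk' : k ≤ b - 1 := by omega
    have : (2:Nat) ^ k ≤ 2 ^ (b - 1) := Nat.pow_le_pow_right (by norm_num) hk'
    omega

lemma pvLenLoop_eq (n : Nat) : ∀ len : Int,
    pvLenLoop n len = len + ((PySem.Int.bitLength (n : Int) + 7) / 8 : Nat) := by
  induction n using Nat.strong_induction_on with
  | _ n ih =>
    intro len
    unfold pvLenLoop
    by_cases h : 0 < n
    · simp only [h, dif_pos]
      rw [ih (n / 256) (Nat.div_lt_self h (by norm_num))]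
      have hlo := PySem.Int.two_pow_bitLength_le (n : Int) (by exact_mod_cast h.ne')
      have hhi := PySem.Int.lt_two_pow_bitLength (n : Int)
      rw [Int.natAbs_natCast] at hlo hhi
      set b := PySem.Int.bitLength (n : Int) with hb
      have hb1 : 1 ≤ b := by
        by_contra hc
        have : b = 0 := by omega
        rw [this] at hhi; simp at hhi; omega
      by_cases h256 : n < 256
      · have hdiv : n / 256 = 0 := Nat.div_eq_of_lt h256
        rw [hdiv]
        have hble : b ≤ 8 := by
          by_contra hc
          have : (2:Nat) ^ 8 ≤ 2 ^ (b - 1) := Nat.pow_le_pow_right (by norm_num) (by omega)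
          norm_num at this; omega
        have : PySem.Int.bitLength ((0:Nat) : Int) = 0 := by decide
        rw [this]
        push_cast
        omega
      · -- n ≥ 256 : bitLength (n/256) = b - 8
        have hb9 : 9 ≤ b := by
          by_contra hc
          have : (2:Nat) ^ b ≤ 2 ^ 8 := Nat.pow_le_pow_right (by norm_num) (by omega)
          norm_num at this; omega
        have hbq : PySem.Int.bitLength ((n / 256 : Nat) : Int) = b - 8 := by
          apply bitLength_eq_of_bracket _ _ (by omega)
          · have : (2:Nat) ^ (b - 8 - 1) * 256 ≤ n := by
              have : (2:Nat) ^ (b - 8 - 1) * 256 = 2 ^ (b - 1) := by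
                rw [show (256:Nat) = 2 ^ 8 from rfl, ← pow_add]
                congr 1; omega
              omega
            exact (Nat.le_div_iff_mul_le (by norm_num)).mpr this
          · have : n < (2:Nat) ^ (b - 8) * 256 := by
              have : (2:Nat) ^ (b - 8) * 256 = 2 ^ b := by
                rw [show (256:Nat) = 2 ^ 8 from rfl, ← pow_add]
                congr 1; omega
              omega
            exact Nat.div_lt_of_lt_mul (by omega)
        rw [hbq]
        push_cast
        omega
    · simp only [h]
      have hn : n = 0 := by omega
      subst hn
      have : PySem.Int.bitLength ((0:Nat) : Int) = 0 := by decide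
      rw [this]
      simp

-- ===== VERDICT (by name: the statement is the Claim_ definition above) =====
theorem get_serialized_length_spec : Claim_equal_get_serialized_length := by
  intro value _
  unfold Spec_get_serialized_length get_serialized_length get_serialized_length_alt
  by_cases h : value < 0x80
  · simp [h]
  · simp only [h, if_false]
    rw [pvLenLoop_eq]
    have hv : ((value.toNat : Nat) : Int) = value := Int.toNat_of_nonneg (by omega)
    rw [hv]
    push_cast
    ring
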